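-- pv_equiv track=rewrite | github.com/GalacticCampaigns/SWSE-GM_Toolkit | scripts/apps/saga_character_multi_converter.py | species_parse_languages
-- ===== SOURCE A (Python) =====
-- def species_parse_languages(row_dict):
--     languages = set(); basic_q_col = row_dict.get('Basic?', '').strip().upper(); lang1_val = row_dict.get('Language 1', '').strip()
--     if basic_q_col == 'Y':
--         if "understand only" in lang1_val.lower() or "understand)" in lang1_val.lower() and "basic" in lang1_val.lower(): languages.add("Basic (Understand only)")
--         else: languages.add("Basic")
--     elif basic_q_col and "understand" in basic_q_col.lower(): languages.add("Basic (Understand only)")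
--     for key in ['Language 1', 'Language 2', 'Language 3']:
--         lang = row_dict.get(key, '').strip()
--         if lang:
--             is_basic_understand_variant = "basic" in lang.lower() and ("understand only" in lang.lower() or "understand)" in lang.lower())
--             is_plain_basic = lang.lower() == "basic"
--             if is_basic_understand_variant:
--                 if "Basic" in languages: languages.remove("Basic")
--                 languages.add("Basic (Understand only)")
--             elif is_plain_basic:
--                 if "Basic (Understand only)" not in languages: languages.add("Basic")
--             else: languages.add(lang)
--     return sorted(list(languages))
-- ===== SOURCE B (Python) =====
-- def _basic_rank(lang):
--     # classification of one language field: 2 = Basic understand-variant, 1 = plain Basic, 0 = ordinary language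
--     low = lang.lower()
--     if "basic" in low and ("understand only" in low or "understand)" in low):
--         return 2
--     if low == "basic":
--         return 1
--     return 0
--
-- def _header_rank(row_dict):
--     # the 'Basic?' column, with A's original operator-precedence on the 'Y' test
--     bq = row_dict.get('Basic?', '').strip().upper()
--     l1 = row_dict.get('Language 1', '').strip().lower()
--     if bq == 'Y':
--         if "understand only" in l1 or ("understand)" in l1 and "basic" in l1):
--             return 2
--         return 1
--     if bq and "understand" in bq.lower():
--         return 2
--     return 0
--
-- def species_parse_languages(row_dict):
--     vals = [row_dict.get(k, '').strip() for k in ('Language 1', 'Language 2', 'Language 3')]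
--     rank = max([_header_rank(row_dict)] + [_basic_rank(v) for v in vals if v])
--     others = {v for v in vals if v and _basic_rank(v) == 0}
--     marker = {"Basic (Understand only)"} if rank == 2 else {"Basic"} if rank == 1 else set()
--     return sorted(others | marker)
-- ===== Notes on version B (the rewrite author's own statement) =====
-- stated objective: alternative
-- what changed: B replaces A's order-dependent set mutation (add 'Basic', remove it when an understand-variant appears, suppress it when 'Basic (Understand only)' is already present) by a declarative classification-and-reduce: every field is mapped to a numeric rank (2 understand-variant, 1 plain Basic, 0 other), the Basic marker is chosen once from the max rank, and the result is sorted(others | marker).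
import Mathlib
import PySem

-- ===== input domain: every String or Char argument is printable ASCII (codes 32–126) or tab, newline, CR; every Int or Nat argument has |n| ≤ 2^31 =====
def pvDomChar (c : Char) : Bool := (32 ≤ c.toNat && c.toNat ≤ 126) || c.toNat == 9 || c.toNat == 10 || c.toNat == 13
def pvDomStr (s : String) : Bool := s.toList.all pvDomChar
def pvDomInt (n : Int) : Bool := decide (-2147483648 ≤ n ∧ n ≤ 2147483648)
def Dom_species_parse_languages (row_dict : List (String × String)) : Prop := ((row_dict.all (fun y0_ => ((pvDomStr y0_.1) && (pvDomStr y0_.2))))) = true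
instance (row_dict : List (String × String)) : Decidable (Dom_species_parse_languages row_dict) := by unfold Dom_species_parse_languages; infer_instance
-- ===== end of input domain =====

-- B replaces A's order-dependent add/remove set mutation by a declarative reduction: each field
-- is classified into a numeric rank (2 understand-variant, 1 plain Basic, 0 other), the marker is
-- chosen by the max rank, and the result is sorted(others | marker) (objective: alternative, same cost).
-- Python's string sort order equals '<' on .toList (code points), so both ports sort with key .toList.

-- ===== PORT A =====
def species_parse_languages (row_dict : List (String × String)) : List String :=
  let languages : PySem.Set String := PySem.Set.empty
  let basic_q_col := PySem.Str.upper (PySem.Str.strip ((PySem.Dict.mk row_dict).getD "Basic?" ""))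
  let lang1_val := PySem.Str.strip ((PySem.Dict.mk row_dict).getD "Language 1" "")
  let languages :=
    if basic_q_col == "Y" then
      (if PySem.Str.isIn "understand only" (PySem.Str.lower lang1_val)
          || (PySem.Str.isIn "understand)" (PySem.Str.lower lang1_val)
              && PySem.Str.isIn "basic" (PySem.Str.lower lang1_val)) then
        PySem.Set.add languages "Basic (Understand only)"
      else PySem.Set.add languages "Basic")
    else if (!(basic_q_col == "")) && PySem.Str.isIn "understand" (PySem.Str.lower basic_q_col) then
      PySem.Set.add languages "Basic (Understand only)"
    else languages
  let languages := ["Language 1", "Language 2", "Language 3"].foldl (fun languages key =>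
    let lang := PySem.Str.strip ((PySem.Dict.mk row_dict).getD key "")
    if !(lang == "") then
      let is_basic_understand_variant := PySem.Str.isIn "basic" (PySem.Str.lower lang)
        && (PySem.Str.isIn "understand only" (PySem.Str.lower lang)
            || PySem.Str.isIn "understand)" (PySem.Str.lower lang))
      let is_plain_basic := PySem.Str.lower lang == "basic"
      if is_basic_understand_variant then
        let languages := if PySem.Set.contains languages "Basic"
          then PySem.Set.discard languages "Basic" else languages
        PySem.Set.add languages "Basic (Understand only)"
      else if is_plain_basic then
        (if !(PySem.Set.contains languages "Basic (Understand only)")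
         then PySem.Set.add languages "Basic" else languages)
      else PySem.Set.add languages lang
    else languages) languages
  PySem.List.sorted languages (fun x => x.toList) false

-- ===== PORT B =====
-- classification of one language field: 2 = Basic understand-variant, 1 = plain Basic, 0 = ordinary
def basicRank (lang : String) : Nat :=
  let low := PySem.Str.lower lang
  if PySem.Str.isIn "basic" low
      && (PySem.Str.isIn "understand only" low || PySem.Str.isIn "understand)" low) then 2
  else if low == "basic" then 1
  else 0

-- the 'Basic?' column, with A's original operator-precedence on the 'Y' test
def headerRank (row_dict : List (String × String)) : Nat :=
  let bq := PySem.Str.upper (PySem.Str.strip ((PySem.Dict.mk row_dict).getD "Basic?" ""))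
  let l1 := PySem.Str.lower (PySem.Str.strip ((PySem.Dict.mk row_dict).getD "Language 1" ""))
  if bq == "Y" then
    (if PySem.Str.isIn "understand only" l1
        || (PySem.Str.isIn "understand)" l1 && PySem.Str.isIn "basic" l1) then 2 else 1)
  else if (!(bq == "")) && PySem.Str.isIn "understand" (PySem.Str.lower bq) then 2
  else 0

def species_parse_languages_alt (row_dict : List (String × String)) : List String :=
  let vals := ["Language 1", "Language 2", "Language 3"].map
    (fun k => PySem.Str.strip ((PySem.Dict.mk row_dict).getD k ""))
  -- Python's max over this (always nonempty) list of Nats = foldl Nat.max 0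
  let rank := ((headerRank row_dict) :: ((vals.filter (fun v => !(v == ""))).map basicRank)).foldl Nat.max 0
  let others := PySem.Set.ofList (vals.filter (fun v => !(v == "") && basicRank v == 0))
  let marker : PySem.Set String :=
    if rank == 2 then ["Basic (Understand only)"] else if rank == 1 then ["Basic"] else []
  PySem.List.sorted (PySem.Set.union others marker) (fun x => x.toList) false

-- ===== PRECONDITION & SPEC =====
def Spec_species_parse_languages (row_dict : List (String × String)) (out : List String) : Prop := out = species_parse_languages_alt row_dict
instance (row_dict : List (String × String)) (out : List String) : Decidable (Spec_species_parse_languages row_dict out) := by unfold Spec_species_parse_languages; infer_instance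

-- ===== CLAIM (what is proved, stated in full; the proofs are below) =====
def Claim_equal_species_parse_languages : Prop := ∀ (row_dict : List (String × String)), Dom_species_parse_languages row_dict → Spec_species_parse_languages row_dict (species_parse_languages row_dict)

-- ===== LEMMAS AND PROOFS =====
-- stepA: the loop body of A's port as a named function (syntactically identical to the lambda
-- in the port), so the loop invariant below can be stated about it.
def stepA (row_dict : List (String × String)) (languages : PySem.Set String) (key : String) :
    PySem.Set String :=
  let lang := PySem.Str.strip ((PySem.Dict.mk row_dict).getD key "")
  if !(lang == "") then
    let is_basic_understand_variant := PySem.Str.isIn "basic" (PySem.Str.lower lang)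
      && (PySem.Str.isIn "understand only" (PySem.Str.lower lang)
          || PySem.Str.isIn "understand)" (PySem.Str.lower lang))
    let is_plain_basic := PySem.Str.lower lang == "basic"
    if is_basic_understand_variant then
      let languages := if PySem.Set.contains languages "Basic"
        then PySem.Set.discard languages "Basic" else languages
      PySem.Set.add languages "Basic (Understand only)"
    else if is_plain_basic then
      (if !(PySem.Set.contains languages "Basic (Understand only)")
       then PySem.Set.add languages "Basic" else languages)
    else PySem.Set.add languages lang
  else languages

def langOf (row_dict : List (String × String)) (k : String) : String :=
  PySem.Str.strip ((PySem.Dict.mk row_dict).getD k "")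

theorem stepA_empty (row_dict : List (String × String)) (S : PySem.Set String) (k : String)
    (he : (langOf row_dict k == "") = true) :
    stepA row_dict S k = S := by
  unfold stepA; unfold langOf at he; dsimp only; split_ifs <;> simp_all

theorem stepA_variant (row_dict : List (String × String)) (S : PySem.Set String) (k : String)
    (he : (langOf row_dict k == "") = false)
    (hv : basicRank (langOf row_dict k) = 2) :
    stepA row_dict S k = PySem.Set.add (if PySem.Set.contains S "Basic"
      then PySem.Set.discard S "Basic" else S) "Basic (Understand only)" := by
  unfold stepA; unfold langOf at he hv; unfold basicRank at hv
  dsimp only at hv ⊢; split_ifs at hv ⊢ <;> simp_all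

theorem stepA_plain (row_dict : List (String × String)) (S : PySem.Set String) (k : String)
    (he : (langOf row_dict k == "") = false)
    (hv : basicRank (langOf row_dict k) = 1) :
    stepA row_dict S k = (if !(PySem.Set.contains S "Basic (Understand only)")
      then PySem.Set.add S "Basic" else S) := by
  unfold stepA; unfold langOf at he hv; unfold basicRank at hv
  dsimp only at hv ⊢; split_ifs at hv ⊢ <;> simp_all

theorem stepA_other (row_dict : List (String × String)) (S : PySem.Set String) (k : String)
    (he : (langOf row_dict k == "") = false)
    (hv : basicRank (langOf row_dict k) = 0) :
    stepA row_dict S k = PySem.Set.add S (langOf row_dict k) := by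
  unfold stepA; unfold langOf at he hv ⊢; unfold basicRank at hv
  dsimp only at hv ⊢; split_ifs at hv ⊢ <;> simp_all

theorem basicRank_cases (lang : String) :
    basicRank lang = 0 ∨ basicRank lang = 1 ∨ basicRank lang = 2 := by
  unfold basicRank; dsimp only; split_ifs <;> simp

theorem other_ne_basic (lang : String) (hv : basicRank lang = 0) :
    lang ≠ "Basic" ∧ lang ≠ "Basic (Understand only)" := by
  constructor <;> rintro rfl <;> revert hv <;> decide

set_option maxHeartbeats 2000000 in
-- The loop invariant: running A's loop from a state S = o ∪ marker(r) produces the state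
-- o ∪ newly collected rank-0 languages ∪ marker(max of r and the ranks seen).
theorem loop_invariant (row_dict : List (String × String)) (ks : List String)
    (S o : PySem.Set String) (r : Nat)
    (hS : S.Nodup) (ho : o.Nodup) (hr : r ≤ 2)
    (hoB : "Basic" ∉ o) (hoU : "Basic (Understand only)" ∉ o)
    (hmem : ∀ x, x ∈ S ↔ x ∈ o ∨ (x = "Basic (Understand only)" ∧ r = 2)
        ∨ (x = "Basic" ∧ r = 1)) :
    (ks.foldl (stepA row_dict) S).Nodup ∧
    (∀ x, x ∈ ks.foldl (stepA row_dict) S ↔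
      (x ∈ o ∨ x ∈ ((ks.map (langOf row_dict)).filter (fun v => !(v == "") && basicRank v == 0)))
      ∨ (x = "Basic (Understand only)"
          ∧ (((ks.map (langOf row_dict)).filter (fun v => !(v == ""))).map basicRank).foldl Nat.max r = 2)
      ∨ (x = "Basic"
          ∧ (((ks.map (langOf row_dict)).filter (fun v => !(v == ""))).map basicRank).foldl Nat.max r = 1)) := by
  induction ks generalizing S o r with
  | nil =>
    refine ⟨hS, fun x => ?_⟩
    simp only [List.map_nil, List.filter_nil, List.foldl_nil, List.not_mem_nil, or_false]
    exact hmem x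
  | cons k ks ih =>
    simp only [List.foldl_cons, List.map_cons]
    by_cases he : (langOf row_dict k == "") = true
    · rw [stepA_empty _ _ _ he]
      simp only [List.filter_cons, he, Bool.false_and, Bool.not_true, Bool.false_eq_true,
        if_false]
      exact ih S o r hS ho hr hoB hoU hmem
    · rw [Bool.not_eq_true] at he
      rcases basicRank_cases (langOf row_dict k) with hv | hv | hv
      · -- ordinary language: collected into o
        rw [stepA_other _ _ _ he hv]
        obtain ⟨hlb, hlu⟩ := other_ne_basic _ hv
        have := ih (PySem.Set.add S (langOf row_dict k)) (PySem.Set.add o (langOf row_dict k)) r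
          (PySem.Set.nodup_add _ _ hS) (PySem.Set.nodup_add _ _ ho) hr
          (by rw [PySem.Set.mem_add]; rintro (h | h); exact hoB h; exact hlb h.symm)
          (by rw [PySem.Set.mem_add]; rintro (h | h); exact hoU h; exact hlu h.symm)
          (by intro x
              rw [PySem.Set.mem_add, PySem.Set.mem_add, hmem x]
              constructor <;>
                (rintro ((h | h) | h)
                 exacts [Or.inl (Or.inl h), Or.inr h, Or.inl (Or.inr h)]))
        refine ⟨this.1, fun x => ?_⟩
        rw [(this.2 x)]
        simp only [List.filter_cons, he, hv, PySem.Set.mem_add, Bool.not_false, Bool.true_and,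
          beq_self_eq_true, if_true, List.mem_cons, List.map_cons, List.foldl_cons]
        have hmr : Nat.max r 0 = r := Nat.max_eq_left (Nat.zero_le r)
        rw [hmr]
        constructor
        · rintro (((h | h) | h) | h)
          exacts [Or.inl (Or.inl h), Or.inl (Or.inr (Or.inl h)),
            Or.inl (Or.inr (Or.inr h)), Or.inr h]
        · rintro ((h | (h | h)) | h)
          exacts [Or.inl (Or.inl (Or.inl h)), Or.inl (Or.inl (Or.inr h)),
            Or.inl (Or.inr h), Or.inr h]
      · -- plain Basic: r becomes max r 1
        rw [stepA_plain _ _ _ he hv]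
        have hBU : ("Basic (Understand only)" ∈ S) ↔ r = 2 := by
          rw [hmem "Basic (Understand only)"]; simp [hoU]
        by_cases h2 : r = 2
        · subst h2
          have hc : PySem.Set.contains S "Basic (Understand only)" = true := by
            simpa [PySem.Set.contains_iff] using hBU.mpr rfl
          rw [hc]
          simp only [Bool.not_true, Bool.false_eq_true, if_false]
          have := ih S o (Nat.max 2 1) hS ho (by decide) hoB hoU
            (by intro x; rw [hmem x]; simp)
          refine ⟨this.1, fun x => ?_⟩
          rw [this.2 x]
          simp [he, hv, List.map_cons, List.foldl_cons]
        · have hc : PySem.Set.contains S "Basic (Understand only)" = false := by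
            simp only [Bool.eq_false_iff, ne_eq, PySem.Set.contains_iff]
            intro hcc; exact h2 (hBU.mp hcc)
          rw [hc]
          simp only [Bool.not_false, if_true]
          have hmax : Nat.max r 1 = 1 := Nat.max_eq_right (by omega)
          have := ih (PySem.Set.add S "Basic") o (Nat.max r 1)
            (PySem.Set.nodup_add _ _ hS) ho (by rw [hmax]; decide) hoB hoU
            (by intro x
                rw [PySem.Set.mem_add, hmem x, hmax]
                constructor
                · rintro ((h | ⟨rfl, h⟩ | ⟨rfl, _⟩) | rfl)
                  · exact Or.inl h
                  · exact absurd h h2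
                  · exact Or.inr (Or.inr ⟨rfl, rfl⟩)
                  · exact Or.inr (Or.inr ⟨rfl, rfl⟩)
                · rintro (h | ⟨rfl, h⟩ | ⟨rfl, _⟩)
                  · exact Or.inl (Or.inl h)
                  · exact absurd h (by decide)
                  · exact Or.inr rfl)
          refine ⟨this.1, fun x => ?_⟩
          rw [this.2 x]
          simp [he, hv, List.map_cons, List.foldl_cons]
      · -- understand-variant: r becomes max r 2 = 2
        rw [stepA_variant _ _ _ he hv]
        have hmax : Nat.max r 2 = 2 := Nat.max_eq_right hr
        have hndS' : (PySem.Set.add (if PySem.Set.contains S "Basic"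
            then PySem.Set.discard S "Basic" else S) "Basic (Understand only)").Nodup := by
          split_ifs with hc
          · exact PySem.Set.nodup_add _ _ (PySem.Set.nodup_discard _ _ hS)
          · exact PySem.Set.nodup_add _ _ hS
        have hmemS0 : ∀ x, x ∈ PySem.Set.add (if PySem.Set.contains S "Basic"
            then PySem.Set.discard S "Basic" else S) "Basic (Understand only)" ↔
            x ∈ o ∨ x = "Basic (Understand only)" := by
          intro x
          have hxo : x ∈ o → x ≠ "Basic" := fun hxo hxe => hoB (hxe ▸ hxo)
          split_ifs with hc
          · rw [PySem.Set.mem_add, PySem.Set.mem_discard]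
            constructor
            · rintro (⟨hxS, hxne⟩ | rfl)
              · rcases (hmem x).mp hxS with h | ⟨rfl, _⟩ | ⟨rfl, _⟩
                · exact Or.inl h
                · exact Or.inr rfl
                · exact absurd rfl hxne
              · exact Or.inr rfl
            · rintro (h | rfl)
              · exact Or.inl ⟨(hmem x).mpr (Or.inl h), hxo h⟩
              · exact Or.inr rfl
          · have hBS : "Basic" ∉ S := by
              intro hmemB
              exact hc ((PySem.Set.contains_iff S "Basic").mpr hmemB)
            rw [PySem.Set.mem_add]
            constructor
            · rintro (hxS | rfl)
              · rcases (hmem x).mp hxS with h | ⟨rfl, _⟩ | ⟨rfl, _⟩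
                · exact Or.inl h
                · exact Or.inr rfl
                · exact absurd hxS hBS
              · exact Or.inr rfl
            · rintro (h | rfl)
              · exact Or.inl ((hmem x).mpr (Or.inl h))
              · exact Or.inr rfl
        have := ih _ o (Nat.max r 2) hndS' ho (by rw [hmax]) hoB hoU
          (by intro x; rw [hmemS0 x, hmax]; simp)
        refine ⟨this.1, fun x => ?_⟩
        rw [this.2 x]
        simp [he, hv, List.map_cons, List.foldl_cons]

theorem sorted_inst_congr (s : List String) :
    PySem.List.sorted s (fun x => x.toList) false
    = @PySem.List.sorted String (List Char) List.instLinearOrder.toLT LinearOrder.toDecidableLT s (fun x => x.toList) false := by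
  congr 1

theorem sorted_mem_ext (s t : List String)
    (hs : s.Nodup) (ht : t.Nodup) (h : ∀ a, a ∈ s ↔ a ∈ t) :
    PySem.List.sorted s (fun x => x.toList) false = PySem.List.sorted t (fun x => x.toList) false := by
  rw [sorted_inst_congr s, sorted_inst_congr t]
  exact PySem.List.sorted_eq_sorted_of_perm s t _ (fun _ _ hh => String.toList_inj.mp hh)
    ((List.perm_ext_iff_of_nodup hs ht).mpr h)

-- max of a list of ranks stays ≤ 2 (used to resolve B's marker if-chain)
theorem foldl_max_le (l : List Nat) : ∀ (r : Nat), r ≤ 2 → (∀ a ∈ l, a ≤ 2) →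
    l.foldl Nat.max r ≤ 2 := by
  induction l with
  | nil => intro r hr _; exact hr
  | cons a l ihl =>
    intro r hr hl
    rw [List.foldl_cons]
    exact ihl _ (Nat.max_le.mpr ⟨hr, hl a (by simp)⟩)
      (fun b hb => hl b (List.mem_cons_of_mem a hb))

-- headerRank names A's initial if-chain: 2/1/2/0 under the same conditions, in the same order.
set_option maxHeartbeats 4000000 in
theorem species_parse_languages_main (row_dict : List (String × String)) :
    species_parse_languages row_dict = species_parse_languages_alt row_dict := by
  have hinit : (if PySem.Str.upper (PySem.Str.strip ((PySem.Dict.mk row_dict).getD "Basic?" "")) == "Y" then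
      (if PySem.Str.isIn "understand only" (PySem.Str.lower (PySem.Str.strip ((PySem.Dict.mk row_dict).getD "Language 1" "")))
          || (PySem.Str.isIn "understand)" (PySem.Str.lower (PySem.Str.strip ((PySem.Dict.mk row_dict).getD "Language 1" "")))
              && PySem.Str.isIn "basic" (PySem.Str.lower (PySem.Str.strip ((PySem.Dict.mk row_dict).getD "Language 1" "")))) then
        PySem.Set.add PySem.Set.empty "Basic (Understand only)"
      else PySem.Set.add PySem.Set.empty "Basic")
    else if (!(PySem.Str.upper (PySem.Str.strip ((PySem.Dict.mk row_dict).getD "Basic?" "")) == ""))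
        && PySem.Str.isIn "understand" (PySem.Str.lower (PySem.Str.upper (PySem.Str.strip ((PySem.Dict.mk row_dict).getD "Basic?" "")))) then
      PySem.Set.add PySem.Set.empty "Basic (Understand only)"
    else PySem.Set.empty)
    = (if headerRank row_dict = 2 then (["Basic (Understand only)"] : PySem.Set String)
       else if headerRank row_dict = 1 then ["Basic"] else []) := by
    unfold headerRank
    dsimp only
    split_ifs <;> first | rfl | omega | simp_all
  have hA : species_parse_languages row_dict =
      PySem.List.sorted ((["Language 1", "Language 2", "Language 3"] : List String).foldl
        (stepA row_dict)
        (if PySem.Str.upper (PySem.Str.strip ((PySem.Dict.mk row_dict).getD "Basic?" "")) == "Y" then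
          (if PySem.Str.isIn "understand only" (PySem.Str.lower (PySem.Str.strip ((PySem.Dict.mk row_dict).getD "Language 1" "")))
              || (PySem.Str.isIn "understand)" (PySem.Str.lower (PySem.Str.strip ((PySem.Dict.mk row_dict).getD "Language 1" "")))
                  && PySem.Str.isIn "basic" (PySem.Str.lower (PySem.Str.strip ((PySem.Dict.mk row_dict).getD "Language 1" "")))) then
            PySem.Set.add PySem.Set.empty "Basic (Understand only)"
          else PySem.Set.add PySem.Set.empty "Basic")
        else if (!(PySem.Str.upper (PySem.Str.strip ((PySem.Dict.mk row_dict).getD "Basic?" "")) == ""))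
            && PySem.Str.isIn "understand" (PySem.Str.lower (PySem.Str.upper (PySem.Str.strip ((PySem.Dict.mk row_dict).getD "Basic?" "")))) then
          PySem.Set.add PySem.Set.empty "Basic (Understand only)"
        else PySem.Set.empty))
        (fun x => x.toList) false := rfl
  have hB : species_parse_languages_alt row_dict =
      PySem.List.sorted (PySem.Set.union
        (PySem.Set.ofList ((["Language 1", "Language 2", "Language 3"].map (langOf row_dict)).filter
          (fun v => !(v == "") && basicRank v == 0)))
        (if (((headerRank row_dict) :: (((["Language 1", "Language 2", "Language 3"].map (langOf row_dict)).filter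
              (fun v => !(v == ""))).map basicRank)).foldl Nat.max 0) == 2 then
          (["Basic (Understand only)"] : PySem.Set String)
         else if (((headerRank row_dict) :: (((["Language 1", "Language 2", "Language 3"].map (langOf row_dict)).filter
              (fun v => !(v == ""))).map basicRank)).foldl Nat.max 0) == 1 then ["Basic"]
         else []))
        (fun x => x.toList) false := rfl
  have hhr : headerRank row_dict ≤ 2 := by
    unfold headerRank; dsimp only; split_ifs <;> omega
  obtain ⟨hndA, hmemA⟩ := loop_invariant row_dict ["Language 1", "Language 2", "Language 3"]
    (if headerRank row_dict = 2 then (["Basic (Understand only)"] : PySem.Set String)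
     else if headerRank row_dict = 1 then ["Basic"] else [])
    PySem.Set.empty (headerRank row_dict)
    (by split_ifs <;> decide) (by decide) hhr (by decide) (by decide)
    (by intro x; split_ifs <;> simp_all [PySem.Set.empty])
  have hfold : (((headerRank row_dict) :: (((["Language 1", "Language 2", "Language 3"].map (langOf row_dict)).filter
        (fun v => !(v == ""))).map basicRank)).foldl Nat.max 0)
      = ((((["Language 1", "Language 2", "Language 3"].map (langOf row_dict)).filter
        (fun v => !(v == ""))).map basicRank).foldl Nat.max (headerRank row_dict)) := by
    have h0 : Nat.max 0 (headerRank row_dict) = headerRank row_dict := by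
      simp
    rw [List.foldl_cons, h0]
  have hrle : ((((["Language 1", "Language 2", "Language 3"].map (langOf row_dict)).filter
        (fun v => !(v == ""))).map basicRank).foldl Nat.max (headerRank row_dict)) ≤ 2 :=
    foldl_max_le _ _ hhr (fun a ha => by
      obtain ⟨v, _, rfl⟩ := List.mem_map.mp ha
      rcases basicRank_cases v with h | h | h <;> omega)
  rw [hA, hinit, hB, hfold]
  refine sorted_mem_ext _ _ hndA (PySem.Set.nodup_union _ _ (PySem.Set.nodup_ofList _)) ?_
  intro x
  rw [hmemA x, PySem.Set.mem_union, PySem.Set.mem_ofList]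
  have h012 : ((((["Language 1", "Language 2", "Language 3"].map (langOf row_dict)).filter
        (fun v => !(v == ""))).map basicRank).foldl Nat.max (headerRank row_dict)) = 0
      ∨ ((((["Language 1", "Language 2", "Language 3"].map (langOf row_dict)).filter
        (fun v => !(v == ""))).map basicRank).foldl Nat.max (headerRank row_dict)) = 1
      ∨ ((((["Language 1", "Language 2", "Language 3"].map (langOf row_dict)).filter
        (fun v => !(v == ""))).map basicRank).foldl Nat.max (headerRank row_dict)) = 2 := by
    omega
  rcases h012 with hG | hG | hG <;> rw [hG] <;> simp [PySem.Set.empty]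

-- ===== VERDICT (by name: the statement is the Claim_ definition above) =====
theorem species_parse_languages_spec : Claim_equal_species_parse_languages := by
  intro row_dict _
  exact species_parse_languages_main row_dict
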